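-- pv_equiv track=rewrite | github.com/Natanlsr/trabalho_otimizacao | Trabalho1.py | pegaLinhasEColunas
-- ===== SOURCE A (Python) =====
-- def pegaLinhasEColunas(matriz):
--     mat = []
--     col = []
--     for i in range(0,len(matriz),1):
--         linhas = [];
--         l =[]
--         for j in range(0,len(matriz),1):
--             linhas.append('M'+ str(i)+ '_' +str(j))
--             l.append('M'+str(j) + '_' +str(i))
--         mat.append(linhas)
--         col.append(l)
--     return mat,col
-- ===== SOURCE B (Python) =====
-- def pegaLinhasEColunas(matriz):
--     n = len(matriz)
--     mat = [['M' + str(i) + '_' + str(j) for j in range(n)] for i in range(n)]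
--     col = [[row[j] for row in mat] for j in range(n)]
--     return mat, col
-- ===== Notes on version B (the rewrite author's own statement) =====
-- stated objective: simpler
-- what changed: B builds only the row-label matrix directly and derives the column matrix as a transpose of it (indexing into mat), instead of computing both grids in parallel inside one nested loop with four accumulators.
import Mathlib
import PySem

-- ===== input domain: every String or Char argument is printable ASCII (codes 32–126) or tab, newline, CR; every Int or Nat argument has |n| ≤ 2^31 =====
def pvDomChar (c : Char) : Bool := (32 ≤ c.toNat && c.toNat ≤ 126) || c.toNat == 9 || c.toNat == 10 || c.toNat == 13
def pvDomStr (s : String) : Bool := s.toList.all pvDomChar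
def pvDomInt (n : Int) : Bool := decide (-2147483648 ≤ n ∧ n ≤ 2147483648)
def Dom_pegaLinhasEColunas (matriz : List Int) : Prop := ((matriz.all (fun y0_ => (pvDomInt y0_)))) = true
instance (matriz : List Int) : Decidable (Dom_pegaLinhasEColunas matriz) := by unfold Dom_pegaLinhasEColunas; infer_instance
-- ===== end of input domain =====

-- B builds only the row-label matrix and derives the column matrix as its transpose
-- (indexing into mat), instead of building both grids in parallel in one nested loop (objective: simpler).

-- ===== PORT A =====
def pegaLinhasEColunas (matriz : List Int) : List (List String) × List (List String) :=
  let n : Int := matriz.length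
  (PySem.List.pyRange 0 n 1).foldl
    (fun (acc : List (List String) × List (List String)) i =>
      let inner := (PySem.List.pyRange 0 n 1).foldl
        (fun (p : List String × List String) j =>
          (p.1 ++ ["M" ++ PySem.Int.toStr i ++ "_" ++ PySem.Int.toStr j],
           p.2 ++ ["M" ++ PySem.Int.toStr j ++ "_" ++ PySem.Int.toStr i]))
        ([], [])
      (acc.1 ++ [inner.1], acc.2 ++ [inner.2]))
    ([], [])

-- ===== PORT B =====
def pegaLinhasEColunas_alt (matriz : List Int) : List (List String) × List (List String) :=
  let n : Int := matriz.length
  let mat := (PySem.List.pyRange 0 n 1).map (fun i =>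
    (PySem.List.pyRange 0 n 1).map (fun j =>
      "M" ++ PySem.Int.toStr i ++ "_" ++ PySem.Int.toStr j))
  let col := (PySem.List.pyRange 0 n 1).map (fun j =>
    mat.map (fun row => PySem.List.pyGetD row j ""))  -- row[j]: always in range (rows have length n)
  (mat, col)

-- ===== PRECONDITION & SPEC =====
def Spec_pegaLinhasEColunas (matriz : List Int) (out : List (List String) × List (List String)) : Prop := out = pegaLinhasEColunas_alt matriz
instance (matriz : List Int) (out : List (List String) × List (List String)) : Decidable (Spec_pegaLinhasEColunas matriz out) := by unfold Spec_pegaLinhasEColunas; infer_instance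

-- ===== CLAIM (what is proved, stated in full; the proofs are below) =====
def Claim_equal_pegaLinhasEColunas : Prop := ∀ (matriz : List Int), Dom_pegaLinhasEColunas matriz → Spec_pegaLinhasEColunas matriz (pegaLinhasEColunas matriz)

-- ===== LEMMAS AND PROOFS =====

/-- Folding two parallel singleton-appends equals a pair of maps. -/
theorem pv_foldl_pair_append {α β : Type} (L : List α) (f g : α → β) :
    ∀ (a b : List β),
      L.foldl (fun (p : List β × List β) j => (p.1 ++ [f j], p.2 ++ [g j])) (a, b)
        = (a ++ L.map f, b ++ L.map g) := by
  induction L with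
  | nil => intro a b; simp [List.foldl]
  | cons x xs ih =>
      intro a b
      simp only [List.foldl, List.map]
      rw [ih]
      simp

theorem pegaLinhasEColunas_spec' (matriz : List Int) :
    pegaLinhasEColunas matriz = pegaLinhasEColunas_alt matriz := by
  unfold pegaLinhasEColunas pegaLinhasEColunas_alt
  simp only []
  -- rewrite the inner pair-fold, then the outer pair-fold, of A
  have hA :
      (PySem.List.pyRange 0 (matriz.length : Int) 1).foldl
        (fun (acc : List (List String) × List (List String)) i =>
          let inner := (PySem.List.pyRange 0 (matriz.length : Int) 1).foldl
            (fun (p : List String × List String) j =>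
              (p.1 ++ ["M" ++ PySem.Int.toStr i ++ "_" ++ PySem.Int.toStr j],
               p.2 ++ ["M" ++ PySem.Int.toStr j ++ "_" ++ PySem.Int.toStr i]))
            ([], [])
          (acc.1 ++ [inner.1], acc.2 ++ [inner.2]))
        ([], [])
      = ((PySem.List.pyRange 0 (matriz.length : Int) 1).map (fun i =>
            (PySem.List.pyRange 0 (matriz.length : Int) 1).map (fun j =>
              "M" ++ PySem.Int.toStr i ++ "_" ++ PySem.Int.toStr j)),
         (PySem.List.pyRange 0 (matriz.length : Int) 1).map (fun i =>
            (PySem.List.pyRange 0 (matriz.length : Int) 1).map (fun j =>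
              "M" ++ PySem.Int.toStr j ++ "_" ++ PySem.Int.toStr i))) := by
    have hinner : ∀ i : Int,
        (PySem.List.pyRange 0 (matriz.length : Int) 1).foldl
          (fun (p : List String × List String) j =>
            (p.1 ++ ["M" ++ PySem.Int.toStr i ++ "_" ++ PySem.Int.toStr j],
             p.2 ++ ["M" ++ PySem.Int.toStr j ++ "_" ++ PySem.Int.toStr i]))
          ([], [])
        = ((PySem.List.pyRange 0 (matriz.length : Int) 1).map (fun j =>
              "M" ++ PySem.Int.toStr i ++ "_" ++ PySem.Int.toStr j),
           (PySem.List.pyRange 0 (matriz.length : Int) 1).map (fun j =>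
              "M" ++ PySem.Int.toStr j ++ "_" ++ PySem.Int.toStr i)) := by
      intro i
      simpa using pv_foldl_pair_append (PySem.List.pyRange 0 (matriz.length : Int) 1)
        (fun j => "M" ++ PySem.Int.toStr i ++ "_" ++ PySem.Int.toStr j)
        (fun j => "M" ++ PySem.Int.toStr j ++ "_" ++ PySem.Int.toStr i) [] []
    simp only [hinner]
    simpa using pv_foldl_pair_append (PySem.List.pyRange 0 (matriz.length : Int) 1)
      (fun i => (PySem.List.pyRange 0 (matriz.length : Int) 1).map (fun j =>
        "M" ++ PySem.Int.toStr i ++ "_" ++ PySem.Int.toStr j))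
      (fun i => (PySem.List.pyRange 0 (matriz.length : Int) 1).map (fun j =>
        "M" ++ PySem.Int.toStr j ++ "_" ++ PySem.Int.toStr i)) [] []
  rw [hA]
  -- B's second component: indexing into mat is the transposed cell
  refine Prod.ext rfl ?_
  apply List.map_congr_left
  intro j hj
  rw [PySem.List.mem_pyRange_one] at hj
  rw [List.map_map]
  apply List.map_congr_left
  intro i _
  simp only [Function.comp]
  simpa using (PySem.List.pyGetD_map_pyRange_of_nonneg (fun j => "M" ++ PySem.Int.toStr i ++ "_" ++ PySem.Int.toStr j) _ j "" hj.1 hj.2).symm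

-- ===== VERDICT (by name: the statement is the Claim_ definition above) =====
theorem pegaLinhasEColunas_spec : Claim_equal_pegaLinhasEColunas := by
  intro matriz _
  exact pegaLinhasEColunas_spec' matriz
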